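-- pv_equiv track=rewrite | github.com/Go-to-Ray/Self_studying | 問題解決のためのPython/一番いい時間3.py | chooseTime
-- ===== SOURCE A (Python) =====
-- def chooseTime(times):
--     rcount = 0
--     maxcount = time = 0
--     for t in times:
--         if t[1] == 'start':
--             rcount += t[2]
--         elif t[1] == 'end':
--             rcount -= t[2]
--         if rcount > maxcount:
--             maxcount = rcount
--             time = t[0]
--     return maxcount,time
-- ===== SOURCE B (Python) =====
-- def chooseTime(times):
--     # pass 1: running signed count at each event
--     pairs = []
--     rcount = 0
--     for t in times:
--         if t[1] == 'start':
--             rcount += t[2]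
--         elif t[1] == 'end':
--             rcount -= t[2]
--         pairs.append((rcount, t[0]))
--     # pass 2: first pair with maximal positive count (max with key keeps the first maximum)
--     return max((p for p in pairs if p[0] > 0), key=lambda p: p[0], default=(0, 0))
-- ===== Notes on version B (the rewrite author's own statement) =====
-- stated objective: alternative
-- what changed: Split A's fused loop into two passes: first materialise the (running count, time) pair per event, then select the first pair with maximal positive count via max(key=...) with default (0,0), instead of tracking the maximum inline.
import Mathlib
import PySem

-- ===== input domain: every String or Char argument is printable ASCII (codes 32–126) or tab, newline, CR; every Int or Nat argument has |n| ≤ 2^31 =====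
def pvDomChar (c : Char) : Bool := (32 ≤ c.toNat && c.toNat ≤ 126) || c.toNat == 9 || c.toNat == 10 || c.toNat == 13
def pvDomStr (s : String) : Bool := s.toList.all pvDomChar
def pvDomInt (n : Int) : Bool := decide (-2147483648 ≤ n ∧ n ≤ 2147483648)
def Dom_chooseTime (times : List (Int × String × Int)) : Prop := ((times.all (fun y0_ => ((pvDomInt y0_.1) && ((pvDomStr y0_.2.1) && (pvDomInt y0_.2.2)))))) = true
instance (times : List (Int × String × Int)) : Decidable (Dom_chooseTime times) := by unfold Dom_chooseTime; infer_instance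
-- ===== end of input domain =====

-- B splits A's fused loop into two passes (materialise (running count, time) pairs, then pick the
-- first maximal positive pair); same behaviour, different decomposition ("alternative").

-- ===== PORT A =====
-- A's loop: state (rcount, maxcount, time), updated per event
def chooseTimeStep (s : Int × Int × Int) (t : Int × String × Int) : Int × Int × Int :=
  let rcount := if t.2.1 = "start" then s.1 + t.2.2
                else if t.2.1 = "end" then s.1 - t.2.2
                else s.1
  if rcount > s.2.1 then (rcount, rcount, t.1) else (rcount, s.2.1, s.2.2)

def chooseTime (times : List (Int × String × Int)) : Int × Int :=
  (times.foldl chooseTimeStep (0, 0, 0)).2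

-- ===== PORT B =====
-- pass 1: list of (running count, time) pairs
def chooseTimePairs (times : List (Int × String × Int)) (rcount : Int) : List (Int × Int) :=
  match times with
  | [] => []
  | t :: rest =>
    let rcount' := if t.2.1 = "start" then rcount + t.2.2
                   else if t.2.1 = "end" then rcount - t.2.2
                   else rcount
    (rcount', t.1) :: chooseTimePairs rest rcount'

-- pass 2: Python max(..., key=fst, default=(0,0)) keeps the FIRST maximal element
def chooseTime_alt (times : List (Int × String × Int)) : Int × Int :=
  ((chooseTimePairs times 0).filter (fun p => p.1 > 0)).foldl
    (fun b p => if p.1 > b.1 then p else b) (0, 0)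

-- ===== PRECONDITION & SPEC =====
def Spec_chooseTime (times : List (Int × String × Int)) (out : Int × Int) : Prop := out = chooseTime_alt times
instance (times : List (Int × String × Int)) (out : Int × Int) : Decidable (Spec_chooseTime times out) := by unfold Spec_chooseTime; infer_instance

-- ===== CLAIM (what is proved, stated in full; the proofs are below) =====
def Claim_equal_chooseTime : Prop := ∀ (times : List (Int × String × Int)), Dom_chooseTime times → Spec_chooseTime times (chooseTime times)

-- ===== LEMMAS AND PROOFS =====
lemma chooseTime_main (times : List (Int × String × Int)) (rc mc tm : Int) (h : 0 ≤ mc) :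
    (times.foldl chooseTimeStep (rc, mc, tm)).2 =
      ((chooseTimePairs times rc).filter (fun p => p.1 > 0)).foldl
        (fun b p => if p.1 > b.1 then p else b) (mc, tm) := by
  induction times generalizing rc mc tm with
  | nil => simp [chooseTimePairs]
  | cons t rest ih =>
    simp only [List.foldl_cons, chooseTimePairs, chooseTimeStep, List.filter_cons]
    set rc' := if t.2.1 = "start" then rc + t.2.2
               else if t.2.1 = "end" then rc - t.2.2
               else rc with hrc'
    by_cases hpos : rc' > 0
    · simp only [hpos, decide_true, if_pos, List.foldl_cons]
      by_cases hgt : rc' > mc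
      · simp only [if_pos hgt]
        exact ih rc' rc' t.1 (by omega)
      · simp only [if_neg hgt]
        exact ih rc' mc tm h
    · have hgt : ¬ rc' > mc := by omega
      simp only [hpos, decide_false, if_neg hgt]
      simp only [Bool.false_eq_true, if_false]
      exact ih rc' mc tm h

-- ===== VERDICT (by name: the statement is the Claim_ definition above) =====
theorem chooseTime_spec : Claim_equal_chooseTime := by
  intro times _
  show chooseTime times = chooseTime_alt times
  unfold chooseTime chooseTime_alt
  exact chooseTime_main times 0 0 0 le_rfl
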